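-- pv_equiv track=rewrite | github.com/diegocodehub/projeto-grafos | byas.py | calcula_intermediacao
-- ===== SOURCE A (Python) =====
-- def caminho_mais_curto_com_matriz(predecessores, start_node, end_node):
--     caminho = []
--     current_node = end_node
--
--     while current_node is not None:
--         caminho.insert(0, current_node)
--         current_node = predecessores[start_node].get(current_node)
--
--     return caminho
--
-- def calcula_intermediacao(vertices, matriz_predecessores):
--     intermediacao = {v: 0 for v in vertices}
--
--     for u in vertices:
--         for v in vertices:
--             if u != v:
--                 caminho = caminho_mais_curto_com_matriz(matriz_predecessores, u, v)
--                 if caminho: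
--                     for vertice in caminho[1:-1]:  #Ignora primeiro e ultimo com [1:-1]
--                         intermediacao[vertice] += 1
--
--     return intermediacao
-- ===== SOURCE B (Python) =====
-- def calcula_intermediacao(vertices, matriz_predecessores):
--     intermediacao = dict.fromkeys(vertices, 0)
--     for u in vertices:
--         for v in vertices:
--             if u != v:
--                 preds = matriz_predecessores[u]
--                 w = preds.get(v)
--                 while w is not None:
--                     nxt = preds.get(w)
--                     if nxt is not None:
--                         intermediacao[w] += 1
--                     w = nxt
--     return intermediacao
-- ===== Notes on version B (the rewrite author's own statement) =====
-- stated objective: alternative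
-- what changed: A rebuilds each shortest path as a list via repeated insert(0, ...) and then slices [1:-1] before counting; B never materializes a path: per pair it streams down the predecessor chain once, incrementing a vertex exactly when it has a predecessor (i.e. is interior).
import Mathlib
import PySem

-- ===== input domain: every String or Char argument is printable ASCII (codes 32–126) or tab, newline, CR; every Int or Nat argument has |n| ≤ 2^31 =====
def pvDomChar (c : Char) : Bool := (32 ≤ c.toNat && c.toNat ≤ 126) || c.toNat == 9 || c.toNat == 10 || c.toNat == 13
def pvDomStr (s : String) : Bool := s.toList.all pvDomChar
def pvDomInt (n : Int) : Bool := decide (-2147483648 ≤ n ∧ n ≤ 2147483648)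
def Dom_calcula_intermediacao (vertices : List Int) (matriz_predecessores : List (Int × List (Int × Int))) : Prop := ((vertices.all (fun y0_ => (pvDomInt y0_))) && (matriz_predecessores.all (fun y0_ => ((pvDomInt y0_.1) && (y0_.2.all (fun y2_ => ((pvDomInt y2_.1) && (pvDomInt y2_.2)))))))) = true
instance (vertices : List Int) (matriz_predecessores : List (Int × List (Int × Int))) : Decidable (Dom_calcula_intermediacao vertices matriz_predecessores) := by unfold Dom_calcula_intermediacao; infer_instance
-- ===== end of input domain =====

-- B replaces A's per-pair path construction (repeated list.insert(0, …) plus a [1:-1] slice)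
-- by a single streaming walk of the predecessor chain that counts interior vertices directly
-- (no intermediate path list is ever built); objective: alternative.

-- ===== PORT A =====
-- intermediacao[vertice] += 1  (Python raises KeyError when the key is absent; Pre_ excludes that)
def pvStep (d : PySem.Dict Int Int) (w : Int) : PySem.Dict Int Int :=
  d.modify w 0 (· + 1)

-- the while-loop of caminho_mais_curto_com_matriz; the fuel only makes it total:
-- fuel preds.length + 1 is exhausted exactly when the Python loop diverges (excluded by Pre_)
def pvWalkA (d : PySem.Dict Int Int) : Nat → Option Int → List Int → List Int
  | _, none, caminho => caminho
  | 0, some _, caminho => caminho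
  | fuel + 1, some cur, caminho => pvWalkA d fuel (d.get? cur) (cur :: caminho)

-- caminho_mais_curto_com_matriz(predecessores, start_node, end_node)
-- (predecessores[start_node] raises KeyError when absent: excluded by Pre_, [] is a dummy)
def pvCaminho (predecessores : List (Int × List (Int × Int))) (start_node end_node : Int) : List Int :=
  match (PySem.Dict.mk predecessores).get? start_node with
  | none => []
  | some preds => pvWalkA (PySem.Dict.mk preds) (preds.length + 1) (some end_node) []

def calcula_intermediacao (vertices : List Int) (matriz_predecessores : List (Int × List (Int × Int))) : List (Int × Int) :=
  let intermediacao : PySem.Dict Int Int :=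
    vertices.foldl (fun d v => d.insert v 0) PySem.Dict.empty
  (vertices.foldl (fun dU u =>
    vertices.foldl (fun dV v =>
      if u ≠ v then
        let caminho := pvCaminho matriz_predecessores u v
        if caminho ≠ [] then
          (PySem.List.slice caminho (some 1) (some (-1))).foldl pvStep dV
        else dV
      else dV) dU) intermediacao).items

-- ===== PORT B =====
-- the while-loop of Source B: walk w, p(w), …, incrementing w whenever it has a predecessor;
-- fuel preds.length + 1 only makes it total (exhausted exactly when the walk diverges)
def pvWalkB (preds : PySem.Dict Int Int) : Nat → Option Int → PySem.Dict Int Int → PySem.Dict Int Int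
  | _, none, inter => inter
  | 0, some _, inter => inter
  | fuel + 1, some w, inter =>
    let nxt := preds.get? w
    pvWalkB preds fuel nxt (if nxt.isSome then pvStep inter w else inter)

def calcula_intermediacao_alt (vertices : List Int) (matriz_predecessores : List (Int × List (Int × Int))) : List (Int × Int) :=
  let intermediacao : PySem.Dict Int Int :=
    vertices.foldl (fun d v => d.insert v 0) PySem.Dict.empty
  (vertices.foldl (fun dU u =>
    vertices.foldl (fun dV v =>
      if u ≠ v then
        match (PySem.Dict.mk matriz_predecessores).get? u with
        | none => dV
        | some preds =>
          pvWalkB (PySem.Dict.mk preds) (preds.length + 1) ((PySem.Dict.mk preds).get? v) dV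
      else dV) dU) intermediacao).items

-- ===== PRECONDITION & SPEC =====
-- the predecessor path of the INPUT graph from cur: [cur, p(cur), …, root], where p is the
-- (first-match) lookup in the given association list. This is a property of the input alone
-- (neither port is defined through it). A path of the functional graph on n keys either ends
-- within n+1 nodes or repeats a key (a cycle); the n+1 bound is therefore exact: none ↔ the
-- input graph has a cycle reachable from cur, i.e. Python's predecessor walk never terminates.
def pvChain (d : PySem.Dict Int Int) : Nat → Int → Option (List Int)
  | 0, _ => none
  | fuel + 1, cur =>
    match d.get? cur with
    | none => some [cur]
    | some p =>
      match pvChain d fuel p with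
      | none => none
      | some c => some (cur :: c)

-- a pair (u, v) is fine: u is a key of the matrix, the chain from v terminates, and every
-- interior vertex of the path is a listed vertex
def pvPairOK (vertices : List Int) (matriz_predecessores : List (Int × List (Int × Int))) (u v : Int) : Bool :=
  match (PySem.Dict.mk matriz_predecessores).get? u with
  | none => false
  | some preds =>
    match pvChain (PySem.Dict.mk preds) (preds.length + 1) v with
    | none => false
    | some c => ((c.drop 1).dropLast).all (fun w => vertices.contains w)

-- exactly the inputs on which the Python A returns: for every ordered pair u ≠ v of listed
-- vertices, u must be a key of matriz_predecessores (else KeyError), the predecessor walk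
-- from v must terminate (else the while-loop diverges), and the interior vertices of the
-- path must be listed vertices (else KeyError on intermediacao[vertice] += 1)
def Pre_calcula_intermediacao (vertices : List Int) (matriz_predecessores : List (Int × List (Int × Int))) : Prop :=
  ∀ u ∈ vertices, ∀ v ∈ vertices, u ≠ v → pvPairOK vertices matriz_predecessores u v = true

instance (vertices : List Int) (matriz_predecessores : List (Int × List (Int × Int))) : Decidable (Pre_calcula_intermediacao vertices matriz_predecessores) := by unfold Pre_calcula_intermediacao; infer_instance

def pvWitness_calcula_intermediacao : List Int × (List (Int × List (Int × Int))) :=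
  ([1, 2, 3], [(1, [(3, 2), (2, 1)]), (2, []), (3, [])])

def Spec_calcula_intermediacao (vertices : List Int) (matriz_predecessores : List (Int × List (Int × Int))) (out : List (Int × Int)) : Prop := out = calcula_intermediacao_alt vertices matriz_predecessores
instance (vertices : List Int) (matriz_predecessores : List (Int × List (Int × Int))) (out : List (Int × Int)) : Decidable (Spec_calcula_intermediacao vertices matriz_predecessores out) := by unfold Spec_calcula_intermediacao; infer_instance

-- ===== CLAIM (what is proved, stated in full; the proofs are below) =====
def Claim_equal_calcula_intermediacao : Prop := ∀ (vertices : List Int) (matriz_predecessores : List (Int × List (Int × Int))), Dom_calcula_intermediacao vertices matriz_predecessores → Pre_calcula_intermediacao vertices matriz_predecessores → Spec_calcula_intermediacao vertices matriz_predecessores (calcula_intermediacao vertices matriz_predecessores)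

-- ===== LEMMAS AND PROOFS =====

theorem pvChain_ne_nil (d : PySem.Dict Int Int) (fuel : Nat) (cur : Int) (c : List Int)
    (h : pvChain d fuel cur = some c) : c ≠ [] := by
  cases fuel with
  | zero => simp [pvChain] at h
  | succ f =>
    rw [pvChain] at h
    cases hg : d.get? cur <;> rw [hg] at h <;> simp only [] at h
    · cases h; simp
    · cases hc : pvChain d f _ <;> rw [hc] at h
      · cases h
      · cases h; simp

-- A's while-loop builds the reversed chain
theorem pvWalkA_chain (d : PySem.Dict Int Int) (fuel : Nat) (cur : Int) (c : List Int)
    (h : pvChain d fuel cur = some c) (acc : List Int) :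
    pvWalkA d fuel (some cur) acc = c.reverse ++ acc := by
  induction fuel generalizing cur c acc with
  | zero => simp [pvChain] at h
  | succ f ih =>
    rw [pvChain] at h
    cases hg : d.get? cur with
    | none =>
      rw [hg] at h; simp only [] at h; cases h
      simp [pvWalkA, hg]
    | some p =>
      rw [hg] at h; simp only [] at h
      cases hc : pvChain d f p with
      | none => rw [hc] at h; cases h
      | some c' =>
        rw [hc] at h; cases h
        rw [pvWalkA, hg, ih p c' hc]
        simp

-- B's while-loop is the fold of pvStep over the interior of the chain
theorem pvWalkB_chain (d : PySem.Dict Int Int) (fuel : Nat) (cur : Int) (c : List Int)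
    (h : pvChain d fuel cur = some c) (inter : PySem.Dict Int Int) :
    pvWalkB d fuel (d.get? cur) inter = ((c.drop 1).dropLast).foldl pvStep inter := by
  induction fuel generalizing cur c inter with
  | zero => simp [pvChain] at h
  | succ f ih =>
    rw [pvChain] at h
    cases hg : d.get? cur with
    | none =>
      rw [hg] at h; simp only [] at h; cases h
      simp [pvWalkB]
    | some p =>
      rw [hg] at h; simp only [] at h
      cases hc : pvChain d f p with
      | none => rw [hc] at h; cases h
      | some c' =>
        rw [hc] at h; cases h
        rw [pvWalkB]
        have hrec := ih p c' hc
        cases hg' : d.get? p with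
        | none =>
          have hc1 : c' = [p] := by
            cases f with
            | zero => simp [pvChain] at hc
            | succ f' => rw [pvChain, hg'] at hc; simp only [] at hc; cases hc; rfl
          subst hc1
          simp [pvWalkB]
        | some q =>
          cases f with
          | zero => simp [pvChain] at hc
          | succ f' =>
            rw [pvChain, hg'] at hc
            simp only [] at hc
            cases hcq : pvChain d f' q with
            | none => rw [hcq] at hc; simp only [] at hc; simp at hc
            | some cq =>
              rw [hcq] at hc; simp only [] at hc; cases hc
              have hne : cq ≠ [] := pvChain_ne_nil d f' q cq hcq
              rw [hg'] at hrec
              have hs : (some q).isSome = true := rfl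
              rw [if_pos hs, hrec (pvStep inter p)]
              simp [List.dropLast_cons_of_ne_nil hne]

-- two increments commute when both keys are already present
theorem pvStep_comm (d : PySem.Dict Int Int) (w w' : Int)
    (hw : d.contains w = true) (hw' : d.contains w' = true) :
    pvStep (pvStep d w) w' = pvStep (pvStep d w') w := by
  by_cases hww : w' = w
  · subst hww; rfl
  · unfold pvStep PySem.Dict.modify
    rw [PySem.Dict.getD_insert_of_ne _ _ _ hww, PySem.Dict.getD_insert_of_ne _ _ _ (Ne.symm hww)]
    apply PySem.Dict.ext
    rw [PySem.Dict.items_insert_of_contains _ _ (by rw [PySem.Dict.contains_insert]; simp [hw']),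
        PySem.Dict.items_insert_of_contains _ _ hw,
        PySem.Dict.items_insert_of_contains _ _ (by rw [PySem.Dict.contains_insert]; simp [hw]),
        PySem.Dict.items_insert_of_contains _ _ hw']
    rw [List.map_map, List.map_map]
    apply List.map_congr_left
    intro p _
    simp only [Function.comp]
    by_cases h1 : p.1 = w <;> by_cases h2 : p.1 = w' <;>
      simp [h1, h2, hww, Ne.symm hww]

theorem contains_pvStep (d : PySem.Dict Int Int) (w x : Int) (h : d.contains x = true) :
    (pvStep d w).contains x = true := by
  unfold pvStep
  rw [PySem.Dict.contains_modify]
  simp [h]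

theorem contains_foldl_pvStep (l : List Int) (d : PySem.Dict Int Int) (x : Int)
    (h : d.contains x = true) : (l.foldl pvStep d).contains x = true := by
  induction l generalizing d with
  | nil => exact h
  | cons w l ih => exact ih (pvStep d w) (contains_pvStep d w x h)

theorem pvStep_foldl_comm (l : List Int) (d : PySem.Dict Int Int) (a : Int)
    (hl : ∀ x ∈ l, d.contains x = true) (ha : d.contains a = true) :
    pvStep (l.foldl pvStep d) a = l.foldl pvStep (pvStep d a) := by
  induction l generalizing d with
  | nil => rfl
  | cons w l ih =>
    simp only [List.foldl_cons]
    rw [ih (pvStep d w) (fun x hx => contains_pvStep d w x (hl x (by simp [hx])))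
          (contains_pvStep d w a ha),
        pvStep_comm d w a (hl w (by simp)) ha]

-- folding the increments in reversed order gives the same dict (all keys present)
theorem pvFoldl_reverse (l : List Int) (d : PySem.Dict Int Int)
    (hl : ∀ x ∈ l, d.contains x = true) :
    l.reverse.foldl pvStep d = l.foldl pvStep d := by
  induction l generalizing d with
  | nil => rfl
  | cons w l ih =>
    have htl : ∀ x ∈ l, d.contains x = true := fun x hx => hl x (by simp [hx])
    rw [List.reverse_cons, List.foldl_append]
    simp only [List.foldl_cons, List.foldl_nil]
    rw [ih d htl, pvStep_foldl_comm l d w htl (hl w (by simp))]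

-- fold congruence with an invariant carried along the accumulator
theorem pv_foldl_eq_inv {α β : Type} (P : β → Prop) (l : List α) (f g : β → α → β) (init : β)
    (h0 : P init) (h : ∀ acc, P acc → ∀ x ∈ l, f acc x = g acc x ∧ P (f acc x)) :
    l.foldl f init = l.foldl g init ∧ P (l.foldl f init) := by
  induction l generalizing init with
  | nil => exact ⟨rfl, h0⟩
  | cons x l ih =>
    obtain ⟨hfg, hP⟩ := h init h0 x (by simp)
    simp only [List.foldl_cons]
    rw [← hfg]
    exact ih (f init x) hP (fun acc hacc y hy => h acc hacc y (by simp [hy]))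

theorem contains_foldl_insert (l : List Int) (d : PySem.Dict Int Int) (x : Int)
    (h : x ∈ l ∨ d.contains x = true) :
    (l.foldl (fun d v => d.insert v 0) d).contains x = true := by
  induction l generalizing d with
  | nil =>
    rcases h with h | h
    · cases h
    · exact h
  | cons w l ih =>
    simp only [List.foldl_cons]
    apply ih
    rcases h with h | h
    · rcases List.mem_cons.mp h with rfl | h
      · right; rw [PySem.Dict.contains_insert]; simp
      · left; exact h
    · right; rw [PySem.Dict.contains_insert]; simp [h]

theorem pv_tail_dropLast {α : Type} (l : List α) : l.tail.dropLast = l.dropLast.tail := by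
  cases l with
  | nil => rfl
  | cons x l =>
    cases l with
    | nil => rfl
    | cons y l => simp [List.dropLast_cons₂]

-- the interior of the reversed path is the reversed interior
theorem pv_interior_reverse {α : Type} (l : List α) :
    (l.reverse.drop 1).dropLast = ((l.drop 1).dropLast).reverse := by
  have h1 : l.reverse.drop 1 = l.dropLast.reverse := by
    rw [List.drop_one, List.tail_reverse]
  have h2 : ∀ (y : List α), y.reverse.dropLast = y.tail.reverse := by
    intro y
    have h := @List.tail_reverse α y.reverse
    rw [List.reverse_reverse] at h
    rw [h, List.reverse_reverse]
  rw [h1, h2, List.drop_one, pv_tail_dropLast]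

-- caminho[1:-1]
theorem pvSlice_interior (l : List Int) :
    PySem.List.slice l (some 1) (some (-1)) = (l.drop 1).dropLast := by
  cases l with
  | nil => rfl
  | cons x t =>
    simp [PySem.List.slice, PySem.List.clampIdx, List.dropLast_eq_take]
    split <;> omega

-- ===== VERDICT (by name: the statement is the Claim_ definition above) =====
theorem calcula_intermediacao_spec : Claim_equal_calcula_intermediacao := by
  intro vertices matriz _dom hpre
  unfold Spec_calcula_intermediacao calcula_intermediacao calcula_intermediacao_alt
  have h0 : ∀ x ∈ vertices,
      (vertices.foldl (fun (d : PySem.Dict Int Int) v => d.insert v 0)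
        PySem.Dict.empty).contains x = true :=
    fun x hx => contains_foldl_insert vertices PySem.Dict.empty x (Or.inl hx)
  refine congrArg PySem.Dict.items
    (pv_foldl_eq_inv (fun dd => ∀ x ∈ vertices, dd.contains x = true)
      vertices _ _ _ h0 ?_).1
  intro dU hU u hu
  refine pv_foldl_eq_inv (fun dd => ∀ x ∈ vertices, dd.contains x = true) vertices _ _ dU hU ?_
  intro dV hV v hv
  by_cases huv : u = v
  · subst huv
    simp only [ne_eq, not_true_eq_false, if_false]
    exact ⟨trivial, hV⟩
  · have hok := hpre u hu v hv huv
    unfold pvPairOK at hok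
    cases hm : (PySem.Dict.mk matriz).get? u with
    | none => rw [hm] at hok; simp only [] at hok; exact absurd hok (by simp)
    | some preds =>
      rw [hm] at hok; simp only [] at hok
      cases hc : pvChain (PySem.Dict.mk preds) (preds.length + 1) v with
      | none => rw [hc] at hok; simp only [] at hok; exact absurd hok (by simp)
      | some c =>
        rw [hc] at hok; simp only [] at hok
        simp only [List.all_eq_true] at hok
        have hcam : pvCaminho matriz u v = c.reverse := by
          unfold pvCaminho
          rw [hm]
          simp only []
          rw [pvWalkA_chain _ _ _ _ hc, List.append_nil]
        have hnil : c ≠ [] := pvChain_ne_nil _ _ _ _ hc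
        have hcont : ∀ x ∈ (c.drop 1).dropLast, dV.contains x = true := by
          intro x hx
          have hmem := hok x hx
          simp only [List.contains_eq_mem, decide_eq_true_eq] at hmem
          exact hV x hmem
        simp only [if_pos huv, hcam]
        rw [if_pos (by simpa using hnil)]
        rw [pvSlice_interior, pv_interior_reverse,
            pvFoldl_reverse _ dV hcont,
            pvWalkB_chain _ _ _ _ hc dV]
        refine ⟨rfl, ?_⟩
        intro x hx
        exact contains_foldl_pvStep _ dV x (hV x hx)
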